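-- pv_equiv track=rewrite | github.com/idohae/Equvalance_Relation | equiv_relation.py | check_transitive
-- ===== SOURCE A (Python) =====
-- def check_transitive(A,R):
--     for (x,y) in R:
--         for z in A:
--             if (y,z) in R:
--                 if (x,z) in R:
--                     continue
--                 else:
--                     return False
--     return True
-- ===== SOURCE B (Python) =====
-- def check_transitive(A, R):
--     Aset = set(A)
--     Rset = set(R)
--     succ = {}
--     for (y, z) in R:
--         succ.setdefault(y, []).append(z)
--     for (x, y) in R:
--         for z in succ.get(y, ()):
--             if z in Aset and (x, z) not in Rset:
--                 return False
--     return True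
-- ===== Notes on version B (the rewrite author's own statement) =====
-- stated objective: faster
-- what changed: Replace the scan over all of A with an adjacency index succ[y] built once from R, plus set-based membership tests for A and R, so only actual successors of y are examined.
import Mathlib
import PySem

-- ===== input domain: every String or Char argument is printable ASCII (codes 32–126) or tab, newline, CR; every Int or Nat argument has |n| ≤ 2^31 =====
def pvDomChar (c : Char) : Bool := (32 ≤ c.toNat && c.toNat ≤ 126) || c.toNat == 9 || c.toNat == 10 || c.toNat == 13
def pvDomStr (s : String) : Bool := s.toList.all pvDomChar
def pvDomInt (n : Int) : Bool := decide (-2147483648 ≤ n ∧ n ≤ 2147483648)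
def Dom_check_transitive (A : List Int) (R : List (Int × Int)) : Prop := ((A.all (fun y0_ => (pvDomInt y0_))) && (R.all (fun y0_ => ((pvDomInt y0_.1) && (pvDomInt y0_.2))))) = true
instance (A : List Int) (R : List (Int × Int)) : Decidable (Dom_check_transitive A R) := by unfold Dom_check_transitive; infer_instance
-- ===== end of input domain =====

-- B replaces A's scan over all of A (with repeated linear searches of R) by an adjacency index succ[y] built once from R plus set membership, for speed.

-- ===== PORT A =====
def check_transitive (A : List Int) (R : List (Int × Int)) : Bool :=
  R.all (fun p =>
    A.all (fun z =>
      if R.contains (p.2, z) then R.contains (p.1, z) else true))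

-- ===== PORT B =====
def check_transitive_alt (A : List Int) (R : List (Int × Int)) : Bool :=
  let Aset := PySem.Set.ofList A
  let Rset := PySem.Set.ofList R
  let succ : PySem.Dict Int (List Int) :=
    R.foldl (fun d p => d.modify p.1 [] (· ++ [p.2])) PySem.Dict.empty
  R.all (fun p =>
    (succ.getD p.2 []).all (fun z =>
      !(Aset.contains z && !Rset.contains (p.1, z))))

-- ===== PRECONDITION & SPEC =====
def Spec_check_transitive (A : List Int) (R : List (Int × Int)) (out : Bool) : Prop := out = check_transitive_alt A R
instance (A : List Int) (R : List (Int × Int)) (out : Bool) : Decidable (Spec_check_transitive A R out) := by unfold Spec_check_transitive; infer_instance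

-- ===== CLAIM (what is proved, stated in full; the proofs are below) =====
def Claim_equal_check_transitive : Prop := ∀ (A : List Int) (R : List (Int × Int)), Dom_check_transitive A R → Spec_check_transitive A R (check_transitive A R)

-- ===== LEMMAS AND PROOFS =====

-- Both sides decide the same condition: for every (x,y) ∈ R and every z with z ∈ A and (y,z) ∈ R, also (x,z) ∈ R.
theorem check_transitive_eq (A : List Int) (R : List (Int × Int)) :
    check_transitive A R = check_transitive_alt A R := by
  simp only [check_transitive, check_transitive_alt,
    PySem.Dict.getD_foldl_modify_append, PySem.Dict.getD_empty]
  rw [Bool.eq_iff_iff]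
  simp only [List.all_eq_true, List.mem_map, List.mem_filter, List.nil_append,
    Bool.not_eq_true', Bool.and_eq_false_iff, Bool.not_eq_false',
    PySem.Set.contains_eq_listContains, List.contains_iff_mem,
    PySem.Set.mem_ofList, beq_iff_eq]
  constructor
  · rintro h p hp z ⟨q, ⟨hqR, hq1⟩, hq2⟩
    by_cases hA : z ∈ A
    · right
      have hyz : (p.2, z) ∈ R := by
        have : (p.2, z) = q := by cases q; simp_all
        rw [this]; exact hqR
      have := h p hp z hA
      rw [if_pos hyz] at this
      simpa using this
    · left
      simpa using hA
  · intro h p hp z hz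
    split_ifs with hR
    · have := h p hp z ⟨(p.2, z), ⟨hR, rfl⟩, rfl⟩
      rcases this with hA | hRz
      · simp at hA; exact absurd hz hA
      · simpa using hRz
    · rfl

-- ===== VERDICT (by name: the statement is the Claim_ definition above) =====
theorem check_transitive_spec : Claim_equal_check_transitive := by
  intro A R _
  unfold Spec_check_transitive
  exact check_transitive_eq A R
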